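-- pv_equiv track=rewrite | github.com/chunweiliu/leetcode2 | paint_house_ii.py | minCostII
-- ===== SOURCE A (Python) =====
-- def minCostII(costs):
--     if not costs or not costs[0]:
--         return 0
--
--     min_spend = costs[0]
--     for cost_for_colors in costs[1:]:
--
--         spent = min_spend[:]
--         for i, cost in enumerate(cost_for_colors):
--
--             # spent[:i] + spent[i+1:] is empty when only one cost_for_colors,
--             # but if that is a cast, we cannot paint anyway.
--             min_spend[i] = cost + min(spent[:i] + spent[i + 1:])
--
--     return min(min_spend)
-- ===== SOURCE B (Python) =====
-- def minCostII(costs):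
--     # O(n*k): per row, one scan finds the minimum of dp, its first index, and the
--     # second minimum, so the "min excluding color i" is an O(1) lookup.
--     if not costs or not costs[0]:
--         return 0
--     dp = list(costs[0])
--     for row in costs[1:]:
--         m1, i1, m2 = dp[0], 0, None
--         for j in range(1, len(dp)):
--             v = dp[j]
--             if v < m1:
--                 m2, m1, i1 = m1, v, j
--             elif m2 is None or v < m2:
--                 m2 = v
--         for j, c in enumerate(row):
--             dp[j] = c + (m2 if j == i1 else m1)
--     return min(dp)
-- ===== Notes on version B (the rewrite author's own statement) =====
-- stated objective: faster
-- what changed: Instead of recomputing min(spent[:i]+spent[i+1:]) with slices for every color, B makes one scan per row that records the row minimum, its first index and the second minimum, so the exclude-i minimum becomes an O(1) lookup.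
import Mathlib
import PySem

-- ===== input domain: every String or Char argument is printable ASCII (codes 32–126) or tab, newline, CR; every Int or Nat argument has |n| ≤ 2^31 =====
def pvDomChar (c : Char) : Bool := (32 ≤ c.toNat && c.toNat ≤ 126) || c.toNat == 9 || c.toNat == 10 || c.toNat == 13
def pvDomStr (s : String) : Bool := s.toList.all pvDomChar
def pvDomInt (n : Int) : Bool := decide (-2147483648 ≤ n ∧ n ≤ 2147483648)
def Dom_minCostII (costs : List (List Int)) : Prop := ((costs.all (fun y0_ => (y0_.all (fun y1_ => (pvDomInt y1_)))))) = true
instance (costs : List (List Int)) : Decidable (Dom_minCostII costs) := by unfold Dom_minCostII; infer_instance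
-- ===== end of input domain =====

-- B replaces A's O(k) slice-minimum inside the inner loop by one scan per row that records
-- the row minimum, its first index and the second minimum (O(n*k) instead of O(n*k^2)).
-- Note: Python A mutates costs[0] in place (min_spend aliases it); the equivalence proved
-- here is about the RETURN value only (B does not mutate its argument).

-- ===== PORT A =====
-- the body of A's outer loop: spent = min_spend[:]; for i, cost in enumerate(row): …
def pvStepA (min_spend cost_for_colors : List Int) : List Int :=
  let spent := min_spend
  (PySem.List.enumerate cost_for_colors).foldl (fun ms ic =>
    -- min_spend[i] = cost + min(spent[:i] + spent[i+1:]); Python raises outside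
    -- Pre_minCostII, so the .getD defaults are unreachable under Pre_minCostII
    PySem.List.pySetD ms ic.1 (ic.2 +
      ((PySem.List.min? (PySem.List.slice spent none (some ic.1) ++
                         PySem.List.slice spent (some (ic.1 + 1)) none)
        (fun y => y)).getD 0))) min_spend

def minCostII (costs : List (List Int)) : Int :=
  match costs with
  | [] => 0
  | c0 :: rest =>
    if c0 = [] then 0
    else
      let ms := rest.foldl pvStepA c0
      (PySem.List.min? ms (fun y => y)).getD 0

-- ===== PORT B =====
-- one pass over dp: (m1, i1, m2) = (minimum, its first index, second minimum or None)
def pvScanStep (dp : List Int) (s : Int × Int × Option Int) (j : Int) : Int × Int × Option Int :=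
  let v := PySem.List.pyGetD dp j 0
  if v < s.1 then (v, j, some s.1)
  else
    match s.2.2 with
    | none => (s.1, s.2.1, some v)
    | some m2v => if v < m2v then (s.1, s.2.1, some v) else s

def pvScan (dp : List Int) : Int × Int × Option Int :=
  (PySem.List.pyRange 1 (dp.length : Int) 1).foldl (pvScanStep dp) (dp.headD 0, 0, none)

-- the body of B's outer loop: the scan, then dp[j] = c + (m2 if j == i1 else m1)
def pvStepB (dp row : List Int) : List Int :=
  let s := pvScan dp
  (PySem.List.enumerate row).foldl (fun d jc =>
    -- Python raises (TypeError: int + None) outside Pre_minCostII, so the .getD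
    -- defaults are unreachable under Pre_minCostII
    PySem.List.pySetD d jc.1 (jc.2 + (if jc.1 = s.2.1 then s.2.2.getD 0 else s.1))) dp

def minCostII_alt (costs : List (List Int)) : Int :=
  match costs with
  | [] => 0
  | c0 :: rest =>
    if c0 = [] then 0
    else
      let dp := rest.foldl pvStepB c0
      (PySem.List.min? dp (fun y => y)).getD 0

-- ===== PRECONDITION & SPEC =====
-- Pre_ excludes exactly the inputs where A raises: a later row longer than the first row
-- (IndexError on min_spend[i]) and a single-color first row together with a nonempty later
-- row (ValueError: min() of the empty list spent[:i] + spent[i+1:]).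
def Pre_minCostII (costs : List (List Int)) : Prop :=
  costs = [] ∨ (costs.headD [] = [] ∨
    ((∀ r ∈ costs.tail, r.length ≤ (costs.headD []).length) ∧
     (2 ≤ (costs.headD []).length ∨ ∀ r ∈ costs.tail, r = [])))
instance (costs : List (List Int)) : Decidable (Pre_minCostII costs) := by
  unfold Pre_minCostII; infer_instance
def pvWitness_minCostII : List (List Int) := [[1, 2, 3], [4, 5, 6], [7, 8, 9]]

def Spec_minCostII (costs : List (List Int)) (out : Int) : Prop := out = minCostII_alt costs
instance (costs : List (List Int)) (out : Int) : Decidable (Spec_minCostII costs out) := by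
  unfold Spec_minCostII; infer_instance

-- ===== CLAIM (what is proved, stated in full; the proofs are below) =====
def Claim_equal_minCostII : Prop := ∀ (costs : List (List Int)), Dom_minCostII costs → Pre_minCostII costs → Spec_minCostII costs (minCostII costs)

-- ===== LEMMAS AND PROOFS =====

-- the invariant of B's scan over a processed prefix `pre` of dp
def pvInv (pre : List Int) (s : Int × Int × Option Int) : Prop :=
  ∃ i : Nat, s.2.1 = (i : Int) ∧ i < pre.length ∧ pre.getD i 0 = s.1 ∧
    (∀ y ∈ pre, s.1 ≤ y) ∧
    (match s.2.2 with
     | none => pre.length = 1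
     | some w => w ∈ pre.eraseIdx i ∧ ∀ y ∈ pre.eraseIdx i, w ≤ y)

lemma pv_min?_eq_some (xs : List Int) (m : Int) (hm : m ∈ xs) (hlb : ∀ y ∈ xs, m ≤ y) :
    PySem.List.min? xs (fun y => y) = some m := by
  have hne : xs ≠ [] := by rintro rfl; simp at hm
  obtain ⟨m', hm'⟩ : ∃ m', PySem.List.min? xs (fun y => y) = some m' := by
    cases h : PySem.List.min? xs (fun y => y) with
    | none => exact absurd ((PySem.List.min?_eq_none_iff xs (fun y => y)).1 h) hne
    | some m' => exact ⟨m', rfl⟩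
  have h1 : m' ∈ xs := PySem.List.min?_mem hm'
  have h2 : m' ≤ m := PySem.List.min?_isMin hm' m hm
  rw [hm', le_antisymm h2 (hlb m' h1)]

lemma pv_mem_eraseIdx_of_ne (l : List Int) (i k : Nat) (hi : i < l.length) (hne : i ≠ k) :
    l[i] ∈ l.eraseIdx k := by
  rw [List.eraseIdx_eq_take_drop_succ]
  rcases Nat.lt_or_ge i k with h | h
  · have hit : i < (l.take k).length := by simp [List.length_take]; omega
    have he : (l.take k)[i] = l[i] := List.getElem_take
    exact List.mem_append_left _ (he ▸ List.getElem_mem hit)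
  · have hik : k < i := lt_of_le_of_ne h (Ne.symm hne)
    have hd : i - (k + 1) < (l.drop (k + 1)).length := by simp [List.length_drop]; omega
    have he : (l.drop (k + 1))[i - (k + 1)] = l[(k + 1) + (i - (k + 1))] := List.getElem_drop
    have heq : (k + 1) + (i - (k + 1)) = i := by omega
    refine List.mem_append_right _ ?_
    have hmem := he ▸ List.getElem_mem hd
    simpa [heq] using hmem

lemma pv_eraseIdx_last (l : List Int) (v : Int) : (l ++ [v]).eraseIdx l.length = l := by
  induction l with
  | nil => rfl
  | cons a l ih => simpa using ih

lemma pvScanStep_inv (dp : List Int) (t : Nat) (ht : t < dp.length) (s : Int × Int × Option Int)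
    (h : pvInv (dp.take t) s) : pvInv (dp.take (t + 1)) (pvScanStep dp s (t : Int)) := by
  obtain ⟨i, hi1, hilt, hget, hmin, hm2⟩ := h
  have hlen : (dp.take t).length = t := by simp [List.length_take]; omega
  have htake : dp.take (t + 1) = dp.take t ++ [dp[t]] := by
    rw [List.take_add_one]; simp [List.getElem?_eq_getElem ht]
  have hlen1 : (dp.take (t + 1)).length = t + 1 := by
    rw [htake, List.length_append, hlen]; rfl
  have hv : PySem.List.pyGetD dp (t : Int) 0 = dp[t] := PySem.List.pyGetD_ofNat dp t 0 ht
  obtain ⟨m1, i1, m2⟩ := s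
  simp only at hi1 hget hmin hm2
  have hmem1 : m1 ∈ dp.take t := by
    have hg := List.getD_eq_getElem (l := dp.take t) (d := 0) (by omega : i < (dp.take t).length)
    rw [hget] at hg
    exact hg ▸ List.getElem_mem _
  have herase : (dp.take t ++ [dp[t]]).eraseIdx t = dp.take t := by
    have hel := pv_eraseIdx_last (dp.take t) dp[t]
    rw [hlen] at hel
    exact hel
  have herase' : (dp.take (t + 1)).eraseIdx i = (dp.take t).eraseIdx i ++ [dp[t]] := by
    rw [htake, List.eraseIdx_append_of_lt_length (by omega)]
  unfold pvScanStep
  rw [hv]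
  by_cases hlt : dp[t] < m1
  · -- new minimum at index t; the old minimum m1 becomes the second minimum
    simp only [hlt, if_true]
    refine ⟨t, rfl, by omega, ?_, ?_, ?_⟩
    · rw [htake, List.getD_eq_getElem _ _ (by rw [← htake]; omega)]
      simp
    · intro y hy
      rw [htake] at hy
      rcases List.mem_append.1 hy with h' | h'
      · exact le_of_lt (lt_of_lt_of_le hlt (hmin y h'))
      · simp at h'; omega
    · simp only [htake, herase]
      exact ⟨hmem1, hmin⟩
  · simp only [hlt, if_false]
    have hm1v : m1 ≤ dp[t] := le_of_not_gt hlt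
    have hget' : (dp.take (t + 1)).getD i 0 = m1 := by
      rw [htake, List.getD_append _ _ _ _ (by omega), hget]
    have hmin' : ∀ y ∈ dp.take (t + 1), m1 ≤ y := by
      intro y hy
      rw [htake] at hy
      rcases List.mem_append.1 hy with h' | h'
      · exact hmin y h'
      · simp at h'; omega
    cases m2 with
    | none =>
      refine ⟨i, hi1, by omega, hget', hmin', ?_⟩
      have ht1 : (dp.take t).length = 1 := hm2
      simp only
      constructor
      · rw [herase']; exact List.mem_append_right _ (by simp)
      · intro y hy
        rw [herase'] at hy
        rcases List.mem_append.1 hy with h' | h'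
        · exfalso
          have h0 : ((dp.take t).eraseIdx i).length = 0 := by
            rw [List.length_eraseIdx_of_lt (by omega)]; omega
          rw [List.length_eq_zero_iff] at h0
          simp [h0] at h'
        · simp at h'; omega
    | some m2v =>
      obtain ⟨hw1, hw2⟩ := hm2
      by_cases hlt2 : dp[t] < m2v
      · simp only [hlt2, if_true]
        refine ⟨i, hi1, by omega, hget', hmin', ?_⟩
        simp only
        constructor
        · rw [herase']; exact List.mem_append_right _ (by simp)
        · intro y hy
          rw [herase'] at hy
          rcases List.mem_append.1 hy with h' | h'
          · exact le_of_lt (lt_of_lt_of_le hlt2 (hw2 y h'))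
          · simp at h'; omega
      · simp only [hlt2, if_false]
        refine ⟨i, hi1, by omega, hget', hmin', ?_⟩
        simp only
        constructor
        · rw [herase']; exact List.mem_append_left _ hw1
        · intro y hy
          rw [herase'] at hy
          rcases List.mem_append.1 hy with h' | h'
          · exact hw2 y h'
          · simp at h'; omega

lemma pvScan_inv (dp : List Int) (hne : dp ≠ []) : pvInv dp (pvScan dp) := by
  have haux : ∀ t : Nat, 1 ≤ t → t ≤ dp.length →
      pvInv (dp.take t)
        ((PySem.List.pyRange 1 (t : Int) 1).foldl (pvScanStep dp) (dp.headD 0, 0, none)) := by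
    intro t
    induction t with
    | zero => omega
    | succ t ih =>
      intro h1 ht
      by_cases ht1 : t = 0
      · subst ht1
        rw [PySem.List.pyRange_one_eq_nil (by norm_num)]
        obtain ⟨a, l, rfl⟩ : ∃ a l, dp = a :: l := by
          cases dp with
          | nil => exact absurd rfl hne
          | cons a l => exact ⟨a, l, rfl⟩
        exact ⟨0, rfl, by simp, by simp, by simp, by simp⟩
      · have h1t : 1 ≤ t := by omega
        have hcast : ((t + 1 : Nat) : Int) = (t : Int) + 1 := by push_cast; ring
        rw [hcast, PySem.List.pyRange_one_succ_right (by exact_mod_cast h1t), List.foldl_append]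
        simp only [List.foldl_cons, List.foldl_nil]
        exact pvScanStep_inv dp t (by omega) _ (ih h1t (by omega))
  have hlen : 1 ≤ dp.length := by
    cases dp with
    | nil => exact absurd rfl hne
    | cons a l => simp
  have hfin := haux dp.length hlen le_rfl
  simpa [pvScan, List.take_length] using hfin

-- the per-color equality: A's slice-minimum equals B's (m1, i1, m2) lookup
lemma pv_exclude_min (dp : List Int) (k : Nat) (_hk : k < dp.length) (h2 : 2 ≤ dp.length) :
    ((PySem.List.min? (PySem.List.slice dp none (some (k : Int)) ++
        PySem.List.slice dp (some ((k : Int) + 1)) none) (fun y => y)).getD 0)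
      = (if (k : Int) = (pvScan dp).2.1 then (pvScan dp).2.2.getD 0 else (pvScan dp).1) := by
  have hne : dp ≠ [] := by intro h; simp [h] at h2
  have hcast : ((k : Int) + 1) = ((k + 1 : Nat) : Int) := by push_cast; ring
  rw [PySem.List.slice_to_natCast, hcast, PySem.List.slice_from_natCast,
    ← List.eraseIdx_eq_take_drop_succ]
  obtain ⟨i, hi1, hilt, hget, hmin, hm2⟩ := pvScan_inv dp hne
  cases hm2eq : (pvScan dp).2.2 with
  | none =>
    rw [hm2eq] at hm2
    simp only at hm2
    omega
  | some w =>
    rw [hm2eq] at hm2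
    obtain ⟨hw1, hw2⟩ := hm2
    have hdpi : dp[i] = (pvScan dp).1 := by
      have hg := List.getD_eq_getElem (l := dp) (d := 0) hilt
      rw [hget] at hg; exact hg.symm
    by_cases hki : k = i
    · subst hki
      rw [if_pos (by rw [hi1])]
      rw [pv_min?_eq_some _ w hw1 hw2]
    · rw [if_neg (by rw [hi1]; exact_mod_cast hki)]
      have hmem : (pvScan dp).1 ∈ dp.eraseIdx k := hdpi ▸ pv_mem_eraseIdx_of_ne dp i k hilt (Ne.symm hki)
      have hlb : ∀ y ∈ dp.eraseIdx k, (pvScan dp).1 ≤ y := fun y hy =>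
        hmin y (List.mem_of_mem_eraseIdx hy)
      rw [pv_min?_eq_some _ _ hmem hlb]
      rfl

-- the per-row equality of the two loop bodies
lemma pv_row_eq (dp row : List Int) (hlen : row.length ≤ dp.length)
    (hcase : 2 ≤ dp.length ∨ row = []) : pvStepA dp row = pvStepB dp row := by
  rcases hcase with h2 | hnil
  · unfold pvStepA pvStepB
    apply PySem.List.foldl_congr_mem
    intro acc x hx
    rcases (PySem.List.mem_enumerate_iff row 0 x).1 hx with ⟨k, hk, rfl⟩
    have hkd : k < dp.length := lt_of_lt_of_le hk hlen
    have := pv_exclude_min dp k hkd h2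
    simp only [zero_add]
    rw [this]
  · subst hnil
    rfl

lemma pv_length_foldl (g : List Int → (Int × Int) → List Int)
    (hg : ∀ d p, (g d p).length = d.length) :
    ∀ (l : List (Int × Int)) (d : List Int), (l.foldl g d).length = d.length := by
  intro l
  induction l with
  | nil => intro d; rfl
  | cons p l ih => intro d; rw [List.foldl_cons, ih, hg]

lemma pv_length_stepB (dp row : List Int) : (pvStepB dp row).length = dp.length := by
  unfold pvStepB
  exact pv_length_foldl _ (fun d p => by simp [PySem.List.length_pySetD]) _ _

lemma pv_outer (k : Nat) :
    ∀ (rest : List (List Int)) (dp : List Int), dp.length = k →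
      (∀ r ∈ rest, r.length ≤ k) → (2 ≤ k ∨ ∀ r ∈ rest, r = []) →
      rest.foldl pvStepA dp = rest.foldl pvStepB dp := by
  intro rest
  induction rest with
  | nil => intro dp _ _ _; rfl
  | cons r rest ih =>
    intro dp hdp hle hcase
    have hstep : pvStepA dp r = pvStepB dp r := by
      apply pv_row_eq
      · rw [hdp]; exact hle r (by simp)
      · rcases hcase with h2 | hall
        · left; omega
        · right; exact hall r (by simp)
    rw [List.foldl_cons, List.foldl_cons, hstep]
    apply ih
    · rw [pv_length_stepB, hdp]
    · intro x hx; exact hle x (by simp [hx])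
    · rcases hcase with h2 | hall
      · left; exact h2
      · right; intro x hx; exact hall x (by simp [hx])

-- ===== VERDICT (by name: the statement is the Claim_ definition above) =====
theorem minCostII_spec : Claim_equal_minCostII := by
  intro costs _ hpre
  unfold Spec_minCostII
  cases costs with
  | nil => rfl
  | cons c0 rest =>
    by_cases hc0 : c0 = []
    · simp [minCostII, minCostII_alt, hc0]
    · unfold Pre_minCostII at hpre
      simp only [List.headD_cons, List.tail_cons] at hpre
      rcases hpre with h | h | ⟨hle, hcase⟩
      · exact absurd h (by simp)
      · exact absurd h hc0
      · simp only [minCostII, minCostII_alt, if_neg hc0]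
        rw [pv_outer c0.length rest c0 rfl hle hcase]
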